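-- pv_equiv track=rewrite | github.com/keriszafir/rpi2casterd | rpi2casterd/main.py | ordered_signals
-- ===== SOURCE A (Python) =====
-- from collections import deque, OrderedDict
--
-- OUTPUT_SIGNALS = tuple(['0075', 'S', '0005', *'ABCDEFGHIJKLMN',
--                         *(str(x) for x in range(1, 15)), 'O15'])
--
-- def ordered_signals(source):
--     """Returns a list of arranged signals ready for display"""
--     arranged = deque(s for s in OUTPUT_SIGNALS if s in source)
--     # put NI, NL, NK, NJ, NKJ etc. at the front
--     if 'N' in arranged:
--         for other in 'JKLI':
--             if other in source:
--                 arranged.remove('N')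
--                 arranged.remove(other)
--                 arranged.appendleft(other)
--                 arranged.appendleft('N')
--     return list(arranged)
-- ===== SOURCE B (Python) =====
-- OUTPUT_SIGNALS = tuple(['0075', 'S', '0005', *'ABCDEFGHIJKLMN',
--                         *(str(x) for x in range(1, 15)), 'O15'])
--
-- def ordered_signals(source):
--     """Returns a list of arranged signals ready for display"""
--     present = [s for s in OUTPUT_SIGNALS if s in source]
--     movers = [c for c in 'JKLI' if c in source]
--     if 'N' not in present or not movers:
--         return present
--     return ['N'] + movers[::-1] + [s for s in present
--                                    if s != 'N' and s not in movers]
-- ===== Notes on version B (the rewrite author's own statement) =====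
-- stated objective: simpler
-- what changed: Replaces the deque mutation loop (repeated remove/appendleft pulling the N signal and each mover to the front) with a direct construction: filter the present signals once, compute the movers, and concatenate the front block with the remaining tail.
import Mathlib
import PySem

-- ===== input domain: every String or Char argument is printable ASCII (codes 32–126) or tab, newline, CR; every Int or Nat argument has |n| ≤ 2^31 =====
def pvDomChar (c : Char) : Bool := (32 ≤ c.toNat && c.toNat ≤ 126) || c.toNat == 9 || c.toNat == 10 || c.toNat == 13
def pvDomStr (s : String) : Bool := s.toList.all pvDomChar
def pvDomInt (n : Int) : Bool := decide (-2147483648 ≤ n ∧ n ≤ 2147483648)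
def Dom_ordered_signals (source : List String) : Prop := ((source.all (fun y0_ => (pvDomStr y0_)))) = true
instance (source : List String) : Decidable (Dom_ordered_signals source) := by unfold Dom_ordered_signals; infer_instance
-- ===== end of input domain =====

-- B replaces A's deque remove/appendleft simulation with a direct construction of the
-- front block ('N' + reversed movers) and the remaining tail (objective: simpler).

-- ===== PORT A =====
def OUTPUT_SIGNALS : List String :=
  ["0075", "S", "0005", "A", "B", "C", "D", "E", "F", "G", "H", "I", "J", "K", "L", "M", "N",
   "1", "2", "3", "4", "5", "6", "7", "8", "9", "10", "11", "12", "13", "14", "O15"]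

-- loop body of A's `for other in 'JKLI'` (deque.remove = remove?; it never fails here,
-- getD keeps the deque unchanged on the unreachable none)
def sigStep (source : List String) (arr : List String) (other : String) : List String :=
  if other ∈ source then
    let arr1 := (PySem.List.remove? arr "N").getD arr
    let arr2 := (PySem.List.remove? arr1 other).getD arr1
    "N" :: other :: arr2
  else arr

def ordered_signals (source : List String) : List String :=
  let arranged := OUTPUT_SIGNALS.filter (fun s => decide (s ∈ source))
  if "N" ∈ arranged then
    ["J", "K", "L", "I"].foldl (sigStep source) arranged
  else arranged

-- ===== PORT B =====
def ordered_signals_alt (source : List String) : List String :=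
  let present := OUTPUT_SIGNALS.filter (fun s => decide (s ∈ source))
  let movers := ["J", "K", "L", "I"].filter (fun c => decide (c ∈ source))
  if "N" ∉ present ∨ movers = [] then present
  else "N" :: movers.reverse ++ present.filter (fun s => decide (s ≠ "N" ∧ s ∉ movers))

-- ===== PRECONDITION & SPEC =====
def Spec_ordered_signals (source : List String) (out : List String) : Prop := out = ordered_signals_alt source
instance (source : List String) (out : List String) : Decidable (Spec_ordered_signals source out) := by unfold Spec_ordered_signals; infer_instance

-- ===== CLAIM (what is proved, stated in full; the proofs are below) =====
def Claim_equal_ordered_signals : Prop := ∀ (source : List String), Dom_ordered_signals source → Spec_ordered_signals source (ordered_signals source)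

-- ===== LEMMAS AND PROOFS =====

-- shape of A's deque after the movers in `mvr` (in processing order) have been pulled to the front
def sigState (P : List String) (mvr : List String) : List String :=
  if mvr = [] then P
  else "N" :: mvr.reverse ++ P.filter (fun s => decide (s ≠ "N" ∧ s ∉ mvr))

lemma step_eq (source P mvr : List String) (hP : P.Nodup) (hN : "N" ∈ P)
    (o : String) (ho : o ∈ source) (hoP : o ∈ P) (hoN : o ≠ "N") (homvr : o ∉ mvr) :
    sigStep source (sigState P mvr) o = sigState P (mvr ++ [o]) := by
  unfold sigStep
  rw [if_pos ho]
  by_cases hm : mvr = []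
  · subst hm
    show "N" :: o :: _ = _
    rw [show sigState P [] = P from rfl,
      PySem.List.remove?_eq_some_erase P "N" hN, Option.getD_some,
      PySem.List.remove?_eq_some_erase _ o ((List.mem_erase_of_ne hoN).mpr hoP),
      Option.getD_some, sigState, if_neg (by simp),
      hP.erase_eq_filter "N", (hP.filter _).erase_eq_filter o, List.filter_filter]
    simp only [List.nil_append, List.reverse_cons, List.reverse_nil, List.cons_append,
      List.nil_append]
    refine congrArg _ (congrArg _ (List.filter_congr ?_))
    intro x _
    by_cases h1 : x = "N" <;> by_cases h2 : x = o <;> simp [h1, h2]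
  · have hT : o ∈ P.filter (fun s => decide (s ≠ "N" ∧ s ∉ mvr)) := by
      rw [List.mem_filter]
      exact ⟨hoP, by simp [hoN, homvr]⟩
    rw [sigState, if_neg hm]
    set T := P.filter (fun s => decide (s ≠ "N" ∧ s ∉ mvr)) with hTdef
    have e1 : PySem.List.remove? ("N" :: (mvr.reverse ++ T)) "N" = some (mvr.reverse ++ T) :=
      PySem.List.remove?_cons_self _ _
    have e2 : PySem.List.remove? (mvr.reverse ++ T) o =
        some ((mvr.reverse ++ T).erase o) :=
      PySem.List.remove?_eq_some_erase _ o (by simp [hT])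
    have e3 : (mvr.reverse ++ T).erase o = mvr.reverse ++ T.erase o :=
      List.erase_append_right _ (by simpa using homvr)
    have e4 : T.erase o = P.filter (fun s => decide (s ≠ "N" ∧ s ∉ mvr ++ [o])) := by
      rw [hTdef, (hP.filter _).erase_eq_filter o, List.filter_filter]
      refine List.filter_congr ?_
      intro x _
      by_cases h1 : x = "N" <;> by_cases h2 : x = o <;> by_cases h3 : x ∈ mvr <;>
        simp [h1, h2, h3]
    simp only [e1, Option.getD_some, e2, e3, e4, sigState, if_neg (show ¬mvr ++ [o] = [] by simp),
      List.reverse_append, List.reverse_cons, List.reverse_nil, List.nil_append,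
      List.cons_append]

lemma fold_inv (source P : List String) (hP : P.Nodup) (hN : "N" ∈ P)
    (os : List String) (mvr : List String)
    (hos : ∀ o ∈ os, o ≠ "N" ∧ (o ∈ source → o ∈ P) ∧ o ∉ mvr)
    (hnd : os.Nodup) :
    os.foldl (sigStep source) (sigState P mvr) =
      sigState P (mvr ++ os.filter (fun o => decide (o ∈ source))) := by
  induction os generalizing mvr with
  | nil => simp
  | cons o os ih =>
    obtain ⟨hoN, hoP, homvr⟩ := hos o (by simp)
    by_cases ho : o ∈ source
    · rw [List.foldl_cons, step_eq source P mvr hP hN o ho (hoP ho) hoN homvr,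
        ih (mvr ++ [o]) ?_ hnd.of_cons]
      · simp [ho]
      · intro y hy
        obtain ⟨h1, h2, h3⟩ := hos y (by simp [hy])
        refine ⟨h1, h2, ?_⟩
        simp only [List.mem_append, List.mem_singleton]
        rintro (h | h)
        · exact h3 h
        · exact (List.nodup_cons.mp hnd).1 (h ▸ hy)
    · rw [List.foldl_cons]
      simp only [sigStep, if_neg ho]
      rw [ih mvr (fun y hy => hos y (by simp [hy])) hnd.of_cons]
      simp [ho]

theorem ordered_signals_spec : Claim_equal_ordered_signals := by
  intro source _
  unfold Spec_ordered_signals ordered_signals ordered_signals_alt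
  set P := OUTPUT_SIGNALS.filter (fun s => decide (s ∈ source)) with hPdef
  have hPnd : P.Nodup := by
    apply List.Nodup.filter
    decide
  by_cases hN : "N" ∈ P
  · rw [if_pos hN]
    have h := fold_inv source P hPnd hN ["J", "K", "L", "I"] []
      (by
        intro o hy
        refine ⟨?_, fun hsrc => ?_, by simp⟩
        · fin_cases hy <;> decide
        · rw [hPdef, List.mem_filter]
          refine ⟨?_, by simp [hsrc]⟩
          fin_cases hy <;> decide)
      (by decide)
    rw [show sigState P [] = P from rfl] at h
    rw [h]
    set movers := ["J", "K", "L", "I"].filter (fun o => decide (o ∈ source)) with hm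
    by_cases hmv : movers = []
    · simp [sigState, hmv, hN]
    · rw [sigState, if_neg (by simpa using hmv), if_neg (by simp [hN, hmv])]
      simp
  · rw [if_neg hN, if_pos (Or.inl hN)]
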